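-- pv_equiv track=rewrite | github.com/hyeeyun93/choco_box | Python3/프로그래머스/0/181926. 수 조작하기 1/수 조작하기 1.py | solution
-- ===== SOURCE A (Python) =====
-- def solution(n, control):
--
--     for e in control:
--         if e == "w":
--             n += 1
--         elif e == "s":
--             n -= 1
--         elif e == "d":
--             n += 10
--         else:
--             n -= 10
--     return n
-- ===== SOURCE B (Python) =====
-- def solution(n, control):
--     cnt = {}
--     for e in control:
--         cnt[e] = cnt.get(e, 0) + 1
--     w = cnt.get("w", 0)
--     s = cnt.get("s", 0)
--     d = cnt.get("d", 0)
--     return n + w - s + 10 * d - 10 * (len(control) - w - s - d)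
-- ===== Notes on version B (the rewrite author's own statement) =====
-- stated objective: alternative
-- what changed: Replaces A's per-character branching mutation of n with a frequency table of the control string built in one pass, followed by a single closed-form arithmetic expression (using len(control) minus the three named counts for the catch-all -10 branch).
import Mathlib
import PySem

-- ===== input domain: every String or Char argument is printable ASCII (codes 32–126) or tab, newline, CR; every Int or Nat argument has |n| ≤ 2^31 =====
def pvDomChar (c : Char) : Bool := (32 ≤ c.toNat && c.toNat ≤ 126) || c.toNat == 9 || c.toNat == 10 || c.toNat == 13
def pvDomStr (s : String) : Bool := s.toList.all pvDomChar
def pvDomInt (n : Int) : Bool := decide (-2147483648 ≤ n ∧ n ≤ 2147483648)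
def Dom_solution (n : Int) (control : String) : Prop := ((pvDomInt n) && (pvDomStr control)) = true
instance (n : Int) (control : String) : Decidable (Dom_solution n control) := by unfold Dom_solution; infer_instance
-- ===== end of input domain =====

-- B replaces A's per-character mutation of n by a frequency table built in one pass
-- plus a single closed-form arithmetic expression (objective: alternative decomposition).

-- ===== PORT A =====
-- for e in control: if e=='w': n+=1 elif e=='s': n-=1 elif e=='d': n+=10 else: n-=10
def solution (n : Int) (control : String) : Int :=
  control.toList.foldl
    (fun n e =>
      if e = 'w' then n + 1
      else if e = 's' then n - 1
      else if e = 'd' then n + 10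
      else n - 10) n

-- ===== PORT B =====
-- cnt = {}; for e in control: cnt[e] = cnt.get(e,0)+1; then the closed form
def solution_alt (n : Int) (control : String) : Int :=
  let cnt : PySem.Dict Char Int :=
    control.toList.foldl (fun d e => d.insert e (d.getD e 0 + 1)) (PySem.Dict.empty)
  let w := cnt.getD 'w' 0
  let s := cnt.getD 's' 0
  let d := cnt.getD 'd' 0
  n + w - s + 10 * d - 10 * ((PySem.Str.len control) - w - s - d)

-- ===== PRECONDITION & SPEC =====
def Spec_solution (n : Int) (control : String) (out : Int) : Prop := out = solution_alt n control
instance (n : Int) (control : String) (out : Int) : Decidable (Spec_solution n control out) := by unfold Spec_solution; infer_instance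

-- ===== CLAIM (what is proved, stated in full; the proofs are below) =====
def Claim_equal_solution : Prop := ∀ (n : Int) (control : String), Dom_solution n control → Spec_solution n control (solution n control)

-- ===== LEMMAS AND PROOFS =====

-- A's fold computes the closed form in terms of character counts.
theorem solution_foldl_counts (l : List Char) (n : Int) :
    l.foldl
      (fun n e =>
        if e = 'w' then n + 1
        else if e = 's' then n - 1
        else if e = 'd' then n + 10
        else n - 10) n
    = n + (l.count 'w' : Int) - (l.count 's' : Int) + 10 * (l.count 'd' : Int)
        - 10 * ((l.length : Int) - (l.count 'w' : Int) - (l.count 's' : Int) - (l.count 'd' : Int)) := by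
  induction l generalizing n with
  | nil => simp
  | cons a t ih =>
    simp only [List.foldl_cons, List.count_cons, List.length_cons, ih]
    by_cases hw : a = 'w' <;> by_cases hs : a = 's' <;> by_cases hd : a = 'd' <;>
      simp [hw, hs, hd] <;> ring

-- ===== VERDICT (by name: the statement is the Claim_ definition above) =====
theorem solution_spec : Claim_equal_solution := by
  intro n control _
  unfold Spec_solution solution solution_alt
  simp only [PySem.Dict.getD_foldl_insert_add_one, PySem.Dict.getD_empty, PySem.Str.len_eq,
    solution_foldl_counts]
  ring
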